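-- pv_equiv track=rewrite | github.com/Ericsson/codechecker | tools/plist_to_html/plist_to_html/PlistToHtml.py | twodim_to_table
-- ===== SOURCE A (Python) =====
-- from typing import Callable, Dict, List, Optional, Set, Tuple
--
-- def twodim_to_table(
--     lines: List[List[str]],
--     separate_head: bool = True,
--     separate_footer: bool = False
-- ) -> Optional[str]:
--     """ Pretty-prints the given two-dimensional array's lines. """
--
--     str_parts = []
--
--     # Count the column width.
--     widths: List[int] = []
--     for line in lines:
--         for i, size in enumerate([len(str(x)) for x in line]):
--             while i >= len(widths):
--                 widths.append(0)
--             if size > widths[i]: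
--                 widths[i] = size
--
--     # Generate the format string to pad the columns.
--     print_string = ""
--     for i, width in enumerate(widths):
--         print_string += "{" + str(i) + ":" + str(width) + "} | "
--
--     if not print_string:
--         return ""
--
--     print_string = print_string[:-3]
--
--     # Print the actual data.
--     str_parts.append("-" * (sum(widths) + 3 * (len(widths) - 1)))
--     for i, line in enumerate(lines):
--         try:
--             str_parts.append(print_string.format(*line))
--         except IndexError:
--             raise TypeError("One of the rows have a different number of "
--                             "columns than the others")
--         if i == 0 and separate_head:
--             str_parts.append("-" * (sum(widths) + 3 * (len(widths) - 1)))
--         if separate_footer and i == len(lines) - 2: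
--             str_parts.append("-" * (sum(widths) + 3 * (len(widths) - 1)))
--
--     str_parts.append("-" * (sum(widths) + 3 * (len(widths) - 1)))
--
--     return '\n'.join(str_parts)
-- ===== SOURCE B (Python) =====
-- from typing import List, Optional
--
--
-- def twodim_to_table(
--     lines: List[List[str]],
--     separate_head: bool = True,
--     separate_footer: bool = False
-- ) -> Optional[str]:
--     """ Pretty-prints the given two-dimensional array's lines. """
--     ncols = max((len(row) for row in lines), default=0)
--     if ncols == 0:
--         return ""
--     if any(len(row) != ncols for row in lines):
--         raise TypeError("One of the rows have a different number of "
--                         "columns than the others")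
--
--     # Column-major width computation.
--     widths = [max(len(row[j]) for row in lines) for j in range(ncols)]
--     sep = "-" * (sum(widths) + 3 * (ncols - 1))
--
--     body = [" | ".join(cell.ljust(w) for cell, w in zip(row, widths))
--             for row in lines]
--     if separate_footer and len(lines) >= 2:
--         body.insert(len(body) - 1, sep)
--     if separate_head:
--         body.insert(1, sep)
--     return "\n".join([sep] + body + [sep])
-- ===== Notes on version B (the rewrite author's own statement) =====
-- stated objective: alternative
-- what changed: B computes column widths column-major in one closed-form pass (max over each column index) instead of A's incrementally grown width array, validates row lengths up front, formats each row by zipping cells with widths and joining with ' | ' instead of interpreting a generated format string, and places the head/footer separator lines by direct list insertion instead of flag checks inside the output loop.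
import Mathlib
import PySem

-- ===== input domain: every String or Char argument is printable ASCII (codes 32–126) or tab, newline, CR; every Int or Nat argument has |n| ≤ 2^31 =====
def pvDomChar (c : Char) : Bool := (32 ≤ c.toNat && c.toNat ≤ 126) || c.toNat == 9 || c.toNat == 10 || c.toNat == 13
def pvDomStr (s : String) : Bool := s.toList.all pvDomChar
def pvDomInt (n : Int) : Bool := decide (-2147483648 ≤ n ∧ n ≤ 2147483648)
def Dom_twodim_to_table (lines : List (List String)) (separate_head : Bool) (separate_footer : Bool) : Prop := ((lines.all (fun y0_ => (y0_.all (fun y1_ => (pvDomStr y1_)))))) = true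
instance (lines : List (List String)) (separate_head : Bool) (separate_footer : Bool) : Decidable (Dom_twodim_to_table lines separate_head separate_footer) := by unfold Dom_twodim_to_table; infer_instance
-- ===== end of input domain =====

-- B re-implements the pretty-printer with a column-major width pass and closed-form separator
-- insertion instead of A's incremental width array and generated format string; objective:
-- alternative (similar cost, plainer structure). On ragged inputs (outside Pre_) both raise TypeError.

-- '{i:w}' / str.ljust padding of a str argument: left-justified, space-filled (exact for str
-- arguments; shared by both ports)
def pvPad (s : String) (w : Nat) : String :=
  String.ofList (s.toList ++ List.replicate (w - s.toList.length) ' ')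

-- ===== PORT A =====

-- the body of A's width loop: 'for i, size in enumerate([len(str(x)) for x in line]):
--   while i >= len(widths): widths.append(0)
--   if size > widths[i]: widths[i] = size'
def pvUpdWidths (widths : List Nat) (line : List String) : List Nat :=
  (PySem.List.enumerate (line.map (fun x => x.toList.length))).foldl
    (fun ws p =>
      let ws2 := ws ++ List.replicate (p.1.toNat + 1 - ws.length) 0
      if p.2 > ws2.getD p.1.toNat 0 then ws2.set p.1.toNat p.2 else ws2)
    widths

-- print_string.format(*line): the generated format string is "{0:w0} | … | {k:wk}", so the result
-- is the ' | '-join of the padded positional arguments; none = IndexError (line shorter than widths)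
def pvFormatRow (widths : List Nat) (line : List String) : Option String :=
  if line.length < widths.length then none
  else some (PySem.Str.join " | "
    ((PySem.List.enumerate widths).map (fun p => pvPad (line.getD p.1.toNat "") p.2)))

-- "-" * (sum(widths) + 3 * (len(widths) - 1))
def pvSep (widths : List Nat) : String :=
  String.ofList (List.replicate (widths.sum + 3 * (widths.length - 1)) '-')

def twodim_to_table (lines : List (List String)) (separate_head : Bool) (separate_footer : Bool) : Option String :=
  let widths := lines.foldl pvUpdWidths []
  if widths.isEmpty then some ""
  else
    let sep := pvSep widths
    ((PySem.List.enumerate lines).foldl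
      (fun acc p => acc.bind (fun parts =>
        (pvFormatRow widths p.2).map (fun s =>
          let parts1 := parts ++ [s]
          let parts2 := if p.1 == 0 && separate_head then parts1 ++ [sep] else parts1
          if separate_footer && p.1 == (lines.length : Int) - 2 then parts2 ++ [sep] else parts2)))
      (some [sep])).map
      (fun parts => PySem.Str.join "\n" (parts ++ [sep]))

-- ===== PORT B =====

-- max(len(row[j]) for row in lines): at every call site all rows have length > j, so getD's
-- default is never used; folding from 0 equals Python's max of this nonempty list of lengths
def pvColWidth (lines : List (List String)) (j : Nat) : Nat :=
  (lines.map (fun row => (row.getD j "").toList.length)).foldl max 0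

def twodim_to_table_alt (lines : List (List String)) (separate_head : Bool) (separate_footer : Bool) : Option String :=
  let ncols := (lines.map List.length).foldl max 0
  if ncols = 0 then some ""
  else if lines.any (fun row => row.length ≠ ncols) then none   -- raise TypeError (ragged rows)
  else
    let widths := (List.range ncols).map (pvColWidth lines)
    let sep := String.ofList (List.replicate (widths.sum + 3 * (ncols - 1)) '-')
    let body := lines.map (fun row =>
      PySem.Str.join " | " ((row.zip widths).map (fun cw => pvPad cw.1 cw.2)))
    let body1 := if separate_footer && decide (2 ≤ lines.length)
                 then body.insertIdx (body.length - 1) sep else body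
    let body2 := if separate_head then body1.insertIdx 1 sep else body1
    some (PySem.Str.join "\n" ([sep] ++ body2 ++ [sep]))

-- ===== PRECONDITION & SPEC =====
-- Pre_ excludes ragged inputs (two rows of different lengths, short row reachable by the format
-- call), on which A raises TypeError; B raises the same TypeError there.
def Pre_twodim_to_table (lines : List (List String)) (separate_head : Bool) (separate_footer : Bool) : Prop :=
  ∀ r ∈ lines, ∀ r' ∈ lines, r.length = r'.length
instance (lines : List (List String)) (separate_head : Bool) (separate_footer : Bool) : Decidable (Pre_twodim_to_table lines separate_head separate_footer) := by unfold Pre_twodim_to_table; infer_instance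

def pvWitness_twodim_to_table : List (List String) × Bool × Bool := ([["ab", "c"], ["d", "efg"]], true, false)

def Spec_twodim_to_table (lines : List (List String)) (separate_head : Bool) (separate_footer : Bool) (out : Option String) : Prop := out = twodim_to_table_alt lines separate_head separate_footer
instance (lines : List (List String)) (separate_head : Bool) (separate_footer : Bool) (out : Option String) : Decidable (Spec_twodim_to_table lines separate_head separate_footer out) := by unfold Spec_twodim_to_table; infer_instance

-- ===== CLAIM (what is proved, stated in full; the proofs are below) =====
def Claim_equal_twodim_to_table : Prop := ∀ (lines : List (List String)) (separate_head : Bool) (separate_footer : Bool), Dom_twodim_to_table lines separate_head separate_footer → Pre_twodim_to_table lines separate_head separate_footer → Spec_twodim_to_table lines separate_head separate_footer (twodim_to_table lines separate_head separate_footer)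

-- ===== LEMMAS AND PROOFS =====

theorem pv_foldl_max_from (l : List Nat) (a : Nat) :
    l.foldl max a = max a (l.foldl max 0) := by
  induction l generalizing a with
  | nil => simp
  | cons x xs ih =>
    simp only [List.foldl_cons]
    rw [ih (max a x), ih (max 0 x)]
    omega

theorem pv_getD_range_map (m : Nat) (g : Nat → Nat) (j : Nat) :
    ((List.range m).map g).getD j 0 = if j < m then g j else 0 := by
  by_cases h : j < m
  · rw [List.getD_eq_getElem?_getD]; simp [h]
  · rw [List.getD_eq_default]
    · simp [h]
    · simp; omega

theorem pv_getD_append_lt (l l' : List Nat) (j : Nat) (h : j < l.length) :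
    (l ++ l').getD j 0 = l.getD j 0 := by
  rw [List.getD_eq_getElem?_getD, List.getD_eq_getElem?_getD, List.getElem?_append_left h]

theorem pv_step_lemma (ws sizes : List Nat) (x : Nat) (R R2 : List Nat)
    (hR : R = (List.range (max ws.length sizes.length)).map
        (fun j => max (ws.getD j 0) (sizes.getD j 0)))
    (hR2 : R2 = R ++ List.replicate (sizes.length + 1 - R.length) 0) :
    (if x > R2.getD sizes.length 0 then R2.set sizes.length x else R2)
    = (List.range (max ws.length (sizes.length + 1))).map
        (fun j => max (ws.getD j 0) ((sizes ++ [x]).getD j 0)) := by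
  have hlen : R.length = max ws.length sizes.length := by simp [hR]
  have hg' : ∀ j, max (ws.getD j 0) ((sizes ++ [x]).getD j 0)
      = if j < sizes.length then max (ws.getD j 0) (sizes.getD j 0)
        else if j = sizes.length then max (ws.getD j 0) x
        else ws.getD j 0 := by
    intro j
    rcases lt_trichotomy j sizes.length with h | h | h
    · rw [pv_getD_append_lt _ _ _ h, if_pos h]
    · subst h
      rw [if_neg (lt_irrefl _), if_pos rfl]
      congr 1
      rw [List.getD_eq_getElem?_getD, List.getElem?_append_right (Nat.le_refl _)]
      simp
    · rw [if_neg (by omega), if_neg (by omega),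
        List.getD_eq_default (sizes ++ [x]) _
          (by simp only [List.length_append, List.length_cons, List.length_nil]; omega)]
      simp
  by_cases hc : ws.length ≤ sizes.length
  · -- widths no longer than the row: one zero is appended, then possibly overwritten
    have hRl : R.length = sizes.length := by omega
    have hrep : List.replicate (sizes.length + 1 - R.length) (0:Nat) = [0] := by
      rw [hRl]; simp
    have hR2' : R2 = R ++ [0] := by rw [hR2, hrep]
    have hget : R2.getD sizes.length 0 = 0 := by
      rw [hR2', List.getD_eq_getElem?_getD, List.getElem?_append_right (by omega)]
      simp [hRl]
    have key : (if x > R2.getD sizes.length 0 then R2.set sizes.length x else R2) = R ++ [x] := by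
      rw [hget, hR2']
      by_cases hx : x > 0
      · rw [if_pos hx, List.set_append_right _ _ (by omega)]
        simp [hRl]
      · rw [if_neg hx]
        have : x = 0 := by omega
        simp [this]
    rw [key]
    have hmax : max ws.length (sizes.length + 1) = sizes.length + 1 :=
      by omega
    rw [hmax, List.range_succ, List.map_append, List.map_singleton]
    congr 1
    · rw [hR, show max ws.length sizes.length = sizes.length by omega]
      apply List.map_congr_left
      intro j hj
      simp at hj
      rw [hg' j, if_pos hj]
    · rw [hg' sizes.length, if_neg (lt_irrefl _), if_pos rfl,
        List.getD_eq_default _ _ (by omega)]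
      simp
  · -- widths already longer than the row: nothing is appended
    have hRl : R.length = ws.length := by omega
    have hrep : sizes.length + 1 - R.length = 0 := by omega
    have hR2' : R2 = R := by rw [hR2, hrep]; simp
    have hmax : max ws.length (sizes.length + 1) = ws.length :=
      by omega
    have hget : R2.getD sizes.length 0 = ws.getD sizes.length 0 := by
      rw [hR2', hR, pv_getD_range_map,
        if_pos (by omega),
        List.getD_eq_default sizes _ (by omega)]
      simp
    rw [hget, hmax, hR2']
    by_cases hx : x > ws.getD sizes.length 0
    · rw [if_pos hx]
      apply List.ext_getElem
      · simp [hRl]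
      · intro j h1 h2
        have hj : j < ws.length := by simpa using h2
        have hRget : ∀ (hj2 : j < R.length), R[j] = max (ws.getD j 0) (sizes.getD j 0) := by
          intro hj2
          rw [List.getElem_of_eq hR]
          simp
        rw [List.getElem_set]
        simp only [List.getElem_map, List.getElem_range]
        rw [hg' j]
        by_cases hjn : sizes.length = j
        · subst hjn
          rw [if_pos rfl, if_neg (lt_irrefl _), if_pos rfl]
          omega
        · rw [if_neg hjn, hRget (by omega)]
          rcases lt_trichotomy j sizes.length with h | h | h
          · rw [if_pos h]
          · exact absurd h.symm hjn
          · rw [if_neg (by omega), if_neg (by omega), List.getD_eq_default sizes _ (by omega)]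
            simp
    · rw [if_neg hx]
      apply List.ext_getElem
      · simp [hRl]
      · intro j h1 h2
        have hj : j < ws.length := by simpa using h2
        rw [List.getElem_of_eq hR]
        simp only [List.getElem_map, List.getElem_range]
        rw [hg' j]
        rcases lt_trichotomy j sizes.length with h | h | h
        · rw [if_pos h]
        · subst h
          rw [if_neg (lt_irrefl _), if_pos rfl, List.getD_eq_default sizes _ (Nat.le_refl _)]
          rw [List.getD_eq_getElem?_getD] at hx
          simp only [List.getD_eq_getElem?_getD]
          omega
        · rw [if_neg (by omega), if_neg (by omega), List.getD_eq_default sizes _ (by omega)]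
          simp

theorem pv_inner_spec (sizes ws : List Nat) :
    (PySem.List.enumerate sizes).foldl
      (fun ws p =>
        let ws2 := ws ++ List.replicate (p.1.toNat + 1 - ws.length) 0
        if p.2 > ws2.getD p.1.toNat 0 then ws2.set p.1.toNat p.2 else ws2)
      ws
    = (List.range (max ws.length sizes.length)).map
        (fun j => max (ws.getD j 0) (sizes.getD j 0)) := by
  induction sizes using List.reverseRecOn with
  | nil =>
    simp [PySem.List.enumerate]
    apply List.ext_getElem
    · simp
    · intro i h1 h2
      simp at h2 ⊢
      rw [List.getElem?_eq_getElem (by simpa using h2)]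
      rfl
  | append_singleton sizes x ih =>
    rw [PySem.List.enumerate_append, List.foldl_append, ih]
    simp only [PySem.List.enumerate_cons, PySem.List.enumerate_nil, List.foldl_cons,
      List.foldl_nil, zero_add, Int.toNat_natCast, List.length_append, List.length_cons,
      List.length_nil]
    exact pv_step_lemma ws sizes x _ _ rfl (by simp)

theorem pv_updWidths_spec (ws : List Nat) (line : List String) :
    pvUpdWidths ws line
    = (List.range (max ws.length line.length)).map
        (fun j => max (ws.getD j 0) ((line.getD j "").toList.length)) := by
  unfold pvUpdWidths
  rw [pv_inner_spec]
  have h1 : (line.map (fun x => x.toList.length)).length = line.length := by simp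
  rw [h1]
  apply List.map_congr_left
  intro j hj
  congr 1
  have : (0:Nat) = "".toList.length := by rfl
  rw [this, List.getD_map]

theorem pv_widths_closed (lines : List (List String)) (ws : List Nat) :
    lines.foldl pvUpdWidths ws
    = (List.range (max ws.length ((lines.map List.length).foldl max 0))).map
        (fun j => max (ws.getD j 0) (pvColWidth lines j)) := by
  induction lines generalizing ws with
  | nil =>
    simp only [List.foldl_nil, List.map_nil, Nat.max_zero]
    have : ∀ j, max (ws.getD j 0) (pvColWidth [] j) = ws.getD j 0 := by
      intro j; simp [pvColWidth]
    rw [List.map_congr_left (fun j _ => this j)]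
    apply List.ext_getElem
    · simp
    · intro i h1 h2
      simp at h2 ⊢
      rw [List.getElem?_eq_getElem (by simpa using h2)]
      rfl
  | cons line rest ih =>
    rw [List.foldl_cons, ih, pv_updWidths_spec]
    have hM : ((line :: rest).map List.length).foldl max 0
        = max line.length ((rest.map List.length).foldl max 0) := by
      simp only [List.map_cons, List.foldl_cons]
      rw [pv_foldl_max_from]
      omega
    have hcol : ∀ j, pvColWidth (line :: rest) j
        = max ((line.getD j "").toList.length) (pvColWidth rest j) := by
      intro j
      simp only [pvColWidth, List.map_cons, List.foldl_cons]
      rw [pv_foldl_max_from]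
      omega
    have hlen : ((List.range (max ws.length line.length)).map
        (fun j => max (ws.getD j 0) ((line.getD j "").toList.length))).length
        = max ws.length line.length := by simp
    rw [hlen, hM]
    have hrange : max (max ws.length line.length) ((rest.map List.length).foldl max 0)
        = max ws.length (max line.length ((rest.map List.length).foldl max 0)) := by omega
    rw [hrange]
    apply List.map_congr_left
    intro j hj
    simp only [List.mem_range] at hj
    rw [hcol j, pv_getD_range_map]
    by_cases h : j < max ws.length line.length
    · rw [if_pos h]
      omega
    · rw [if_neg h]
      rw [List.getD_eq_default ws _ (by omega), List.getD_eq_default line _ (by omega)]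
      simp

theorem pv_M_const (lines : List (List String)) (n : Nat) (hne : lines ≠ [])
    (h : ∀ r ∈ lines, r.length = n) :
    (lines.map List.length).foldl max 0 = n := by
  induction lines with
  | nil => exact absurd rfl hne
  | cons r rest ih =>
    simp only [List.map_cons, List.foldl_cons]
    rw [pv_foldl_max_from]
    have hr : r.length = n := h r (List.mem_cons_self)
    cases rest with
    | nil => simp [hr]
    | cons r2 rs =>
      rw [ih (by simp) (fun x hx => h x (List.mem_cons_of_mem _ hx))]
      omega

theorem pv_fmt_eq (widths : List Nat) (row : List String) (h : row.length = widths.length) :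
    (PySem.List.enumerate widths).map (fun p => pvPad (row.getD p.1.toNat "") p.2)
    = (row.zip widths).map (fun cw => pvPad cw.1 cw.2) := by
  apply List.ext_getElem
  · simp [PySem.List.length_enumerate, h]
  · intro k h1 h2
    have hk : k < widths.length := by simpa [PySem.List.length_enumerate] using h1
    simp only [List.getElem_map, PySem.List.getElem_enumerate, List.getElem_zip]
    have : ((0:Int) + k).toNat = k := by omega
    rw [this]
    congr 1
    rw [List.getD_eq_getElem?_getD, List.getElem?_eq_getElem (by omega)]
    rfl

theorem pv_foldl_option {α β γ : Type} (l : List α) (F : α → Option γ) (fv : α → γ)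
    (step : α → β → γ → β) (init : β) (h : ∀ p ∈ l, F p = some (fv p)) :
    l.foldl (fun acc p => acc.bind (fun parts => (F p).map (step p parts))) (some init)
    = some (l.foldl (fun parts p => step p parts (fv p)) init) := by
  induction l generalizing init with
  | nil => rfl
  | cons p rest ih =>
    simp only [List.foldl_cons]
    rw [show F p = some (fv p) from h p List.mem_cons_self]
    exact ih _ (fun q hq => h q (List.mem_cons_of_mem _ hq))

theorem pv_tailflat (fmt : List String → String) (sep : String) (c : Bool) (t : Int)
    (rest : List (List String)) (s : Int) :
    (PySem.List.enumerate rest s).flatMap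
      (fun p => [fmt p.2] ++ (if c && p.1 == t then [sep] else []))
    = if c = true ∧ s ≤ t ∧ t < s + rest.length
      then (rest.map fmt).insertIdx ((t - s).toNat + 1) sep
      else rest.map fmt := by
  induction rest generalizing s with
  | nil =>
    rw [if_neg (by rintro ⟨_, h1, h2⟩; simp at h2; omega)]
    simp [PySem.List.enumerate_nil]
  | cons r rs ih =>
    rw [PySem.List.enumerate_cons]
    simp only [List.flatMap_cons]
    rw [ih (s + 1)]
    by_cases hc : c = true
    · by_cases hst : s = t
      · subst hst
        rw [if_pos (by simp [hc]), if_neg (by rintro ⟨_, h1, _⟩; omega),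
          if_pos (by refine ⟨hc, le_refl _, ?_⟩; simp only [List.length_cons]; omega)]
        simp
      · rw [if_neg (by simp [hc]; omega)]
        by_cases hcond : s + 1 ≤ t ∧ t < s + 1 + rs.length
        · rw [if_pos ⟨hc, hcond⟩, if_pos (by refine ⟨hc, by omega, ?_⟩; simp only [List.length_cons]; omega)]
          have h1 : ((t - s).toNat + 1) = ((t - (s + 1)).toNat + 1) + 1 := by omega
          rw [h1, List.map_cons, List.insertIdx_succ_cons]
          simp
        · rw [if_neg (by rintro ⟨_, h1, h2⟩; exact hcond ⟨by omega, by omega⟩),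
            if_neg (by rintro ⟨_, h1, h2⟩; simp at h2; exact hcond ⟨by omega, by omega⟩)]
          simp
    · simp [hc]

theorem pv_step_shape {α : Type} (sep : String) (fb : α → String) (c1 c2 : α → Bool) :
    (fun (parts : List String) (p : α) =>
      if (c2 p) = true then
        (if (c1 p) = true then parts ++ [fb p] ++ [sep] else parts ++ [fb p]) ++ [sep]
      else if (c1 p) = true then parts ++ [fb p] ++ [sep] else parts ++ [fb p])
    = fun parts p => parts ++ ([fb p]
        ++ (if (c1 p) = true then [sep] else [])
        ++ (if (c2 p) = true then [sep] else [])) := by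
  funext parts p
  by_cases h1 : c1 p = true <;> by_cases h2 : c2 p = true <;> simp [h1, h2]

theorem pv_flatMap_congr {α β : Type} (l : List α) (f g : α → List β)
    (h : ∀ x ∈ l, f x = g x) : l.flatMap f = l.flatMap g := by
  induction l with
  | nil => rfl
  | cons x xs ih =>
    simp only [List.flatMap_cons]
    rw [h x List.mem_cons_self, ih (fun y hy => h y (List.mem_cons_of_mem _ hy))]

set_option maxHeartbeats 2000000 in
theorem pv_main (lines : List (List String)) (sh sf : Bool)
    (hpre : ∀ r ∈ lines, ∀ r' ∈ lines, r.length = r'.length) :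
    twodim_to_table lines sh sf = twodim_to_table_alt lines sh sf := by
  cases lines with
  | nil => rfl
  | cons r0 rest =>
    have hall : ∀ r ∈ r0 :: rest, r.length = r0.length :=
      fun r hr => hpre r hr r0 List.mem_cons_self
    have hM : ((r0 :: rest).map List.length).foldl max 0 = r0.length :=
      pv_M_const _ _ (by simp) hall
    have hW : (r0 :: rest).foldl pvUpdWidths []
        = (List.range r0.length).map (pvColWidth (r0 :: rest)) := by
      rw [pv_widths_closed, hM]
      simp
    simp only [twodim_to_table, twodim_to_table_alt]
    rw [hW, hM]
    rcases Nat.eq_zero_or_pos r0.length with hn | hn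
    · simp [hn]
    · rw [if_neg (by simp only [List.isEmpty_iff, List.map_eq_nil_iff, List.range_eq_nil]; omega),
        if_neg (by omega),
        if_neg (by simp only [List.any_eq_true, ne_eq, decide_eq_true_eq, not_exists, not_and,
          not_not]; exact hall)]
      have hWlen : (List.map (pvColWidth (r0 :: rest)) (List.range r0.length)).length = r0.length := by
        simp
      have hsep : String.ofList
            (List.replicate ((List.map (pvColWidth (r0 :: rest)) (List.range r0.length)).sum
              + 3 * (r0.length - 1)) '-')
          = pvSep (List.map (pvColWidth (r0 :: rest)) (List.range r0.length)) := by
        rw [pvSep, hWlen]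
      rw [hsep]
      set W := List.map (pvColWidth (r0 :: rest)) (List.range r0.length) with hWd
      set sep := pvSep W with hsepd
      have hrowfmt : ∀ p ∈ PySem.List.enumerate (r0 :: rest), pvFormatRow W p.2
          = some (PySem.Str.join " | " (List.map (fun cw => pvPad cw.1 cw.2) (p.2.zip W))) := by
        intro p hp
        have hp2 : p.2 ∈ r0 :: rest := by
          rcases (PySem.List.mem_enumerate_iff _ _ _).mp hp with ⟨k, hk, rfl⟩
          exact List.getElem_mem hk
        have hlen2 : p.2.length = W.length := by
          rw [hWlen]; exact hall _ hp2
        rw [pvFormatRow, if_neg (by omega), pv_fmt_eq _ _ hlen2]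
      have hopt := pv_foldl_option (PySem.List.enumerate (r0 :: rest))
        (fun p => pvFormatRow W p.2)
        (fun p => PySem.Str.join " | " (List.map (fun cw => pvPad cw.1 cw.2) (p.2.zip W)))
        (fun p a s =>
          if (sf && p.1 == ((r0 :: rest).length : Int) - 2) = true then
            (if (p.1 == 0 && sh) = true then a ++ [s] ++ [sep] else a ++ [s]) ++ [sep]
          else if (p.1 == 0 && sh) = true then a ++ [s] ++ [sep] else a ++ [s])
        [sep] hrowfmt
      rw [hopt, Option.map_some]
      beta_reduce
      rw [pv_step_shape sep
          (fun (p : Int × List String) =>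
            PySem.Str.join " | " (List.map (fun (cw : String × Nat) => pvPad cw.1 cw.2) (p.2.zip W)))
          (fun (p : Int × List String) => p.1 == 0 && sh)
          (fun (p : Int × List String) => sf && p.1 == ((r0 :: rest).length : Int) - 2),
        PySem.List.foldl_append_eq_flatMap]
      have hflatcongr : ∀ p ∈ PySem.List.enumerate rest 1,
          ([PySem.Str.join " | " (List.map (fun (cw : String × Nat) => pvPad cw.1 cw.2) (p.2.zip W))]
            ++ (if (p.1 == 0 && sh) = true then [sep] else [])
            ++ (if (sf && p.1 == ((r0 :: rest).length : Int) - 2) = true then [sep] else []))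
          = ([PySem.Str.join " | " (List.map (fun (cw : String × Nat) => pvPad cw.1 cw.2) (p.2.zip W))]
            ++ (if (sf && p.1 == ((r0 :: rest).length : Int) - 2) = true then [sep] else [])) := by
        intro p hp
        rcases (PySem.List.mem_enumerate_iff _ _ _).mp hp with ⟨k, hk, rfl⟩
        have hne : (((1:Int) + (k:Int)) == (0:Int)) = false := by
          simp only [beq_eq_false_iff_ne, ne_eq]
          omega
        simp [hne]
      rw [PySem.List.enumerate_cons, List.flatMap_cons, zero_add,
        pv_flatMap_congr _ _ _ hflatcongr,
        pv_tailflat (fun row => PySem.Str.join " | "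
            (List.map (fun (cw : String × Nat) => pvPad cw.1 cw.2) (row.zip W)))
          sep sf (((r0 :: rest).length : Int) - 2) rest 1]
      congr 1
      congr 1
      simp only [List.append_assoc]
      congr 1
      cases rest with
      | nil =>
        by_cases hsh : sh = true <;> by_cases hsf : sf = true <;>
          simp [hsh, hsf]
      | cons r1 rs =>
        have hlen2 : ((r0 :: r1 :: rs).length : Int) - 2 = (rs.length : Int) := by
          simp only [List.length_cons]
          push_cast
          ring
        rw [hlen2]
        by_cases hsf : sf = true
        · rcases Nat.eq_zero_or_pos rs.length with hrs | hrs
          · have hrsnil : rs = [] := List.length_eq_zero_iff.mp hrs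
            subst hrsnil
            by_cases hsh : sh = true <;> simp [hsh, hsf, List.insertIdx]
          · have hTF : sf = true ∧ 1 ≤ (rs.length : Int) ∧ (rs.length : Int) < 1 + ((r1 :: rs).length : Nat) := by
              refine ⟨hsf, by omega, by simp only [List.length_cons]; push_cast; omega⟩
            rw [if_pos hTF,
              if_neg (show ¬ ((sf && (0:Int) == (rs.length : Int)) = true) by simp [hsf]; omega)]
            have hidx : ((rs.length : Int) - 1).toNat + 1 = rs.length := by omega
            rw [hidx]
            have hBidx : (List.map (fun row => PySem.Str.join " | "
                (List.map (fun (cw : String × Nat) => pvPad cw.1 cw.2) (row.zip W)))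
                  (r0 :: r1 :: rs)).length - 1 = rs.length + 1 := by simp
            rw [if_pos (show (sf && decide (2 ≤ (r0 :: r1 :: rs).length)) = true by simp [hsf]),
              hBidx]
            by_cases hsh : sh = true <;>
              simp [hsh, List.insertIdx_succ_cons]
        · have hsf' : sf = false := by
            cases sf
            · rfl
            · exact absurd rfl hsf
          by_cases hsh : sh = true <;> simp [hsh, hsf']

-- ===== VERDICT (by name: the statement is the Claim_ definition above) =====
theorem twodim_to_table_spec : Claim_equal_twodim_to_table := by
  intro lines separate_head separate_footer _hdom hpre
  unfold Spec_twodim_to_table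
  exact pv_main lines separate_head separate_footer hpre
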